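-- pv_equiv track=rewrite | github.com/Andrey-Figueroa/Python-2024 | ProyectoCifrado.py | codificarPorCodigoTelefonico
-- ===== SOURCE A (Python) =====
-- def codificarPorCodigoTelefonico(pCadena):
--     if not isinstance(pCadena, str):
--         return "Cadena invalida, debe ser una cadena de texto."
--     if(pCadena == ""):
--         return "Cadena invalida, la cadena no puede estar vacia."
--     telefono = {
--         'A': '21', 'B': '22', 'C': '23','D': '31', 'E': '32', 'F': '33',
--         'G': '41', 'H': '42', 'I': '43','J': '51', 'K': '52', 'L': '53',
--         'M': '61', 'N': '62', 'O': '63','P': '71', 'Q': '72', 'R': '73',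
--         'S': '74','T': '81', 'U': '82', 'V': '83','W': '91', 'X': '92',
--         'Y': '93', 'Z': '94'
--     }
--     codigo = ""
--     letras = "ABCDEFGHIJKLMNOPQRSTUVWXYZ"
--     pCadena = pCadena.upper()
--     for caracter in pCadena:
--         if(caracter in letras):
--             codigo += telefono[caracter] + " "
--         elif(caracter == " "):
--             codigo += "*"
--         else:
--             codigo += caracter
--     return codigo
-- ===== SOURCE B (Python) =====
-- def _enc(c):
--     o = ord(c)
--     if 97 <= o <= 122:
--         o -= 32
--     if 65 <= o <= 90:
--         k = o - 65
--         if k < 15: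
--             key, pos = 2 + k // 3, k % 3
--         elif k < 19:
--             key, pos = 7, k - 15
--         elif k < 22:
--             key, pos = 8, k - 19
--         else:
--             key, pos = 9, k - 22
--         return chr(48 + key) + chr(49 + pos) + ' '
--     if c == ' ':
--         return '*'
--     return c
--
-- def codificarPorCodigoTelefonico(pCadena):
--     if not isinstance(pCadena, str):
--         return "Cadena invalida, debe ser una cadena de texto."
--     if pCadena == "":
--         return "Cadena invalida, la cadena no puede estar vacia."
--     return ''.join(map(_enc, pCadena))
-- ===== Notes on version B (the rewrite author's own statement) =====
-- stated objective: alternative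
-- what changed: A's dictionary lookup inside a branching accumulation loop is replaced by a table-free closed-form computation: each letter's keypad code (key digit and position digit) is derived arithmetically from ord(c) via integer division/subtraction on the keypad group boundaries, and the pieces are joined with ''.join(map(...)); no dict, no 26-letter membership scan, no whole-string upper() pass.
import Mathlib
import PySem

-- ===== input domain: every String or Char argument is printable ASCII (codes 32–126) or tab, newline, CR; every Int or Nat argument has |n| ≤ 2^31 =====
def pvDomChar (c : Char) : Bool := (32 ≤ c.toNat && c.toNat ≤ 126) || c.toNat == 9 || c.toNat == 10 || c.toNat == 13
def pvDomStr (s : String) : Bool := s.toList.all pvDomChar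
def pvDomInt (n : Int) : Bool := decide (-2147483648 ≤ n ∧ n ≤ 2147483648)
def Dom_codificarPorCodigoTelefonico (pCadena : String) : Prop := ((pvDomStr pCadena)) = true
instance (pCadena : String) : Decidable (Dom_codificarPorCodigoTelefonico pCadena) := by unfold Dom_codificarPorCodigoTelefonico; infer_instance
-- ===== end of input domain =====

-- B drops A's dictionary and branching loop: each letter's keypad code is computed as a
-- closed-form arithmetic function of its ASCII ordinal (alternative; same cost).

-- ===== PORT A =====
-- the dict literal 'telefono'
def pvTelefono : PySem.Dict Char (List Char) := PySem.Dict.ofList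
  [('A', ['2','1']), ('B', ['2','2']), ('C', ['2','3']), ('D', ['3','1']), ('E', ['3','2']),
   ('F', ['3','3']), ('G', ['4','1']), ('H', ['4','2']), ('I', ['4','3']), ('J', ['5','1']),
   ('K', ['5','2']), ('L', ['5','3']), ('M', ['6','1']), ('N', ['6','2']), ('O', ['6','3']),
   ('P', ['7','1']), ('Q', ['7','2']), ('R', ['7','3']), ('S', ['7','4']), ('T', ['8','1']),
   ('U', ['8','2']), ('V', ['8','3']), ('W', ['9','1']), ('X', ['9','2']), ('Y', ['9','3']),
   ('Z', ['9','4'])]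

def pvLetras : List Char := "ABCDEFGHIJKLMNOPQRSTUVWXYZ".toList

-- the 'isinstance' guard cannot fire under the type convention (pCadena is always a str);
-- 'telefono[caracter]' is guarded by 'caracter in letras', so getD with a dummy default is exact
def codificarPorCodigoTelefonico (pCadena : String) : String :=
  if pCadena == "" then "Cadena invalida, la cadena no puede estar vacia."
  else
    String.mk ((PySem.Chars.upper pCadena.toList).foldl
      (fun acc c =>
        acc ++ (if pvLetras.contains c then PySem.Dict.getD pvTelefono c [] ++ [' ']
                else if c == ' ' then ['*'] else [c])) [])

-- ===== PORT B =====
-- _enc: the keypad code as arithmetic on ord(c); chr(48+key), chr(49+pos) as Char.ofNat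
def pvEnc (c : Char) : List Char :=
  let o0 := c.toNat
  let o := if 97 ≤ o0 ∧ o0 ≤ 122 then o0 - 32 else o0
  if 65 ≤ o ∧ o ≤ 90 then
    let k := o - 65
    let kp : Nat × Nat :=
      if k < 15 then (2 + k / 3, k % 3)
      else if k < 19 then (7, k - 15)
      else if k < 22 then (8, k - 19)
      else (9, k - 22)
    [Char.ofNat (48 + kp.1), Char.ofNat (49 + kp.2), ' ']
  else if c == ' ' then ['*'] else [c]

-- ''.join(map(_enc, pCadena)) is the flat map of _enc over the characters
def codificarPorCodigoTelefonico_alt (pCadena : String) : String :=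
  if pCadena == "" then "Cadena invalida, la cadena no puede estar vacia."
  else String.mk (pCadena.toList.flatMap pvEnc)

-- ===== PRECONDITION & SPEC =====
def Spec_codificarPorCodigoTelefonico (pCadena : String) (out : String) : Prop := out = codificarPorCodigoTelefonico_alt pCadena
instance (pCadena : String) (out : String) : Decidable (Spec_codificarPorCodigoTelefonico pCadena out) := by unfold Spec_codificarPorCodigoTelefonico; infer_instance

-- ===== CLAIM (what is proved, stated in full; the proofs are below) =====
def Claim_equal_codificarPorCodigoTelefonico : Prop := ∀ (pCadena : String), Dom_codificarPorCodigoTelefonico pCadena → Spec_codificarPorCodigoTelefonico pCadena (codificarPorCodigoTelefonico pCadena)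

-- ===== LEMMAS AND PROOFS =====

set_option maxRecDepth 4000 in
-- A's loop body applied to the uppercased character agrees with _enc, for every character
-- with code < 127 (checked exhaustively)
lemma pv_point_fin : ∀ (n : Fin 127),
    (if pvLetras.contains (PySem.Chars.upperChar (Char.ofNat n.val)) then
        PySem.Dict.getD pvTelefono (PySem.Chars.upperChar (Char.ofNat n.val)) [] ++ [' ']
      else if PySem.Chars.upperChar (Char.ofNat n.val) == ' ' then ['*']
      else [PySem.Chars.upperChar (Char.ofNat n.val)])
    = pvEnc (Char.ofNat n.val) := by decide

lemma pv_point (c : Char) (h : pvDomChar c = true) :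
    (if pvLetras.contains (PySem.Chars.upperChar c) then
        PySem.Dict.getD pvTelefono (PySem.Chars.upperChar c) [] ++ [' ']
      else if PySem.Chars.upperChar c == ' ' then ['*']
      else [PySem.Chars.upperChar c])
    = pvEnc c := by
  have hn : c.toNat < 127 := by
    simp only [pvDomChar, Bool.or_eq_true, Bool.and_eq_true, decide_eq_true_eq, beq_iff_eq] at h
    omega
  have := pv_point_fin ⟨c.toNat, hn⟩
  simpa only [Char.ofNat_toNat] using this

-- ===== VERDICT (by name: the statement is the Claim_ definition above) =====
theorem codificarPorCodigoTelefonico_spec : Claim_equal_codificarPorCodigoTelefonico := by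
  intro s hdom
  unfold Spec_codificarPorCodigoTelefonico codificarPorCodigoTelefonico codificarPorCodigoTelefonico_alt
  by_cases h : s == ""
  · simp [h]
  · simp only [h, if_false, Bool.false_eq_true]
    rw [PySem.List.foldl_append_eq_flatMap, PySem.Chars.upper, List.flatMap_map]
    congr 1
    refine List.flatMap_congr (fun c hc => ?_)
    have hdc : pvDomChar c = true := by
      have : ∀ x ∈ s.toList, pvDomChar x = true := by
        simpa [Dom_codificarPorCodigoTelefonico, pvDomStr, List.all_eq_true] using hdom
      exact this c hc
    exact pv_point c hdc
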